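-- pv_equiv track=rewrite | github.com/richardkyu/eliminatestars | refactored_game_solution.py | modify_gameboard
-- ===== SOURCE A (Python) =====
-- def modify_gameboard(gameboard, nodes_to_remove):
-- 	'''
-- 	Simulates a move in the game. It expects nodes_to_remove to
-- 	be a list of positions to be removed, and then this function
-- 	handles the shifting around.
--
-- 	gameboard IS modified. If you need a copy, do copy.deepcopy()
-- 	before passing it as an argument.
-- 	'''
-- 	if len(nodes_to_remove) < 2:
-- 		return gameboard
--
-- 	# Remove nodes
-- 	for node in nodes_to_remove:
-- 		x, y = node
-- 		gameboard[x][y] = 0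
--
-- 	# Next, collapse each column down
-- 	# so that all the 0s are on top
-- 	for col in range(9):
-- 		blank_square_row = 8
--
-- 		for row in range(8, -1, -1):
-- 			if gameboard[row][col] == 0:
-- 				continue
-- 			piece_value = gameboard[row][col]
-- 			gameboard[row][col] = 0
-- 			gameboard[blank_square_row][col] = piece_value
--
-- 			blank_square_row -= 1
--
-- 	# Then shift any empty columns to the left
-- 	leftmost_col = 0
--
-- 	for col in range(9):
-- 		# don't shift empty columns
-- 		if gameboard[8][col] == 0:
-- 			continue
--
-- 		# shift this column if columns to the left have been shifted
-- 		if col != leftmost_col: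
-- 			for row in range(9):
-- 				gameboard[row][leftmost_col] = gameboard[row][col]
-- 				gameboard[row][col] = 0
--
-- 		leftmost_col += 1
--
-- 	return gameboard
-- ===== SOURCE B (Python) =====
-- def modify_gameboard(gameboard, nodes_to_remove):
-- 	'''
-- 	Same move simulation: remove the nodes, let pieces fall, then pack
-- 	non-empty columns to the left. gameboard IS modified in place.
-- 	'''
-- 	if len(nodes_to_remove) < 2:
-- 		return gameboard
--
-- 	# Remove nodes (same loop as the original)
-- 	for node in nodes_to_remove:
-- 		x, y = node
-- 		gameboard[x][y] = 0
--
-- 	# Gravity: rebuild each column as zeros on top of its nonzero pieces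
-- 	for col in range(9):
-- 		pieces = [gameboard[r][col] for r in range(9) if gameboard[r][col] != 0]
-- 		k = len(pieces)
-- 		for r in range(9):
-- 			gameboard[r][col] = 0 if r < 9 - k else pieces[r - (9 - k)]
--
-- 	# Left shift: rebuild each row from the kept (non-empty) columns
-- 	kept = [c for c in range(9) if gameboard[8][c] != 0]
-- 	for r in range(9):
-- 		vals = [gameboard[r][c] for c in kept]
-- 		vals += [0] * (9 - len(vals))
-- 		for c in range(9):
-- 			gameboard[r][c] = vals[c]
--
-- 	return gameboard
-- ===== Notes on version B (the rewrite author's own statement) =====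
-- stated objective: simpler
-- what changed: The pointer-chasing in-place loops (blank_square_row cursor moving pieces one by one; leftmost_col cursor swapping whole columns) are replaced by filter-and-rebuild: each column is rebuilt as zeros over its nonzero pieces, and each row is rebuilt from the list of kept (non-empty) columns.
import Mathlib
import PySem

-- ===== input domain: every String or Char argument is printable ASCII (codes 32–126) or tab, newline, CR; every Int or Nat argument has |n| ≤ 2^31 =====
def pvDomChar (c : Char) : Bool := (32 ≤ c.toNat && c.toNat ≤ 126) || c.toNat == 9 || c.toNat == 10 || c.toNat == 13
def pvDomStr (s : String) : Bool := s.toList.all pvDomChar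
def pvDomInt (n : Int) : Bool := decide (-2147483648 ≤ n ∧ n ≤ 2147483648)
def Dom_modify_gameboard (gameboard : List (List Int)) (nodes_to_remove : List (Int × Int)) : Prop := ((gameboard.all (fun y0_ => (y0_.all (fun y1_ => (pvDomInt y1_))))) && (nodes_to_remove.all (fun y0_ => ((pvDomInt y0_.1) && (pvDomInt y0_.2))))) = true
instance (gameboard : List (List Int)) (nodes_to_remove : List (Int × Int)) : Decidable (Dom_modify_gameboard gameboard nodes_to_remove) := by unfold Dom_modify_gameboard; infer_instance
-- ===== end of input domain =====

-- B replaces A's two pointer-chasing in-place passes (blank_square_row / leftmost_col cursors)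
-- by filter-and-rebuild of each column and row: simpler decomposition, same cost.
-- Both Pythons mutate gameboard in place and return it; they perform the same mutation,
-- and the equivalence proved here is about the returned board.

-- Shared board primitives (used by both ports; the node-removal loop is the identical
-- Python line in A and in B, so it is one shared helper).
-- pyNorm9 is the exact Python index normalisation for -9 ≤ i < 9 on a length-9 list
-- (Pre_ guarantees exactly that range).
def pyNorm9 (i : Int) : Nat := (if i < 0 then i + 9 else i).toNat

-- gameboard[r][c] = v (in-range under Pre_; List.modify/List.set are the exact write then)
def setC (g : List (List Int)) (r c : Nat) (v : Int) : List (List Int) :=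
  g.modify r (fun row => row.set c v)

-- gameboard[r][c] (in-range under Pre_)
def getC (g : List (List Int)) (r c : Nat) : Int := (g.getD r []).getD c 0

def removeNodes (g : List (List Int)) (nodes : List (Int × Int)) : List (List Int) :=
  nodes.foldl (fun g n => setC g (pyNorm9 n.1) (pyNorm9 n.2) 0) g

-- ===== PORT A =====
-- inner loop 'for row in range(8,-1,-1)' over state (gameboard, blank_square_row)
def gravColA (g : List (List Int)) (c : Nat) : List (List Int) :=
  (((List.range 9).reverse).foldl (fun st r =>
      if getC st.1 r c = 0 then st
      else
        let v := getC st.1 r c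
        (setC (setC st.1 r c 0) st.2 c v, st.2 - 1))
    (g, 8)).1

def gravA (g : List (List Int)) : List (List Int) :=
  (List.range 9).foldl gravColA g

-- 'for row in range(9): g[row][leftmost]=g[row][col]; g[row][col]=0'
def shiftColA (g : List (List Int)) (l c : Nat) : List (List Int) :=
  (List.range 9).foldl (fun g r => setC (setC g r l (getC g r c)) r c 0) g

def shiftA (g : List (List Int)) : List (List Int) :=
  ((List.range 9).foldl (fun st c =>
      if getC st.1 8 c = 0 then st
      else if c ≠ st.2 then (shiftColA st.1 st.2 c, st.2 + 1)
      else (st.1, st.2 + 1))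
    (g, 0)).1

def modify_gameboard (gameboard : List (List Int)) (nodes_to_remove : List (Int × Int)) : List (List Int) :=
  if nodes_to_remove.length < 2 then gameboard
  else shiftA (gravA (removeNodes gameboard nodes_to_remove))

-- ===== PORT B =====
-- column c of the board, rows 0..8
def colOf (g : List (List Int)) (c : Nat) : List Int :=
  (List.range 9).map (fun r => getC g r c)

-- pieces = [g[r][col] for r in range(9) if g[r][col] != 0]; then overwrite the column
def gravColB (g : List (List Int)) (c : Nat) : List (List Int) :=
  let pieces := (colOf g c).filter (· ≠ 0)
  let k := pieces.length
  (List.range 9).foldl (fun g r =>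
      setC g r c (if r < 9 - k then 0 else pieces.getD (r - (9 - k)) 0)) g

def gravB (g : List (List Int)) : List (List Int) :=
  (List.range 9).foldl gravColB g

-- kept = [c for c in range(9) if g[8][c] != 0]; rebuild each row from the kept columns
def shiftB (g : List (List Int)) : List (List Int) :=
  let kept := (List.range 9).filter (fun c => getC g 8 c ≠ 0)
  (List.range 9).foldl (fun g r =>
      let vals := kept.map (fun c => getC g r c) ++ List.replicate (9 - kept.length) 0
      (List.range 9).foldl (fun g c => setC g r c (vals.getD c 0)) g) g

def modify_gameboard_alt (gameboard : List (List Int)) (nodes_to_remove : List (Int × Int)) : List (List Int) :=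
  if nodes_to_remove.length < 2 then gameboard
  else shiftB (gravB (removeNodes gameboard nodes_to_remove))

-- ===== PRECONDITION & SPEC =====
-- When at least two nodes are removed, Pre_ fixes the board to the game's 9×9 grid with
-- Python-valid node indices (A raises IndexError outside those index ranges). This DOES
-- narrow A's domain: A also returns on boards larger than 9×9, collapsing only the
-- top-left 9×9 play area; those out-of-game shapes are excluded (B agrees there too).
def Pre_modify_gameboard (gameboard : List (List Int)) (nodes_to_remove : List (Int × Int)) : Prop :=
  nodes_to_remove.length < 2 ∨
  (gameboard.length = 9 ∧ (∀ row ∈ gameboard, row.length = 9) ∧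
   ∀ n ∈ nodes_to_remove, -9 ≤ n.1 ∧ n.1 < 9 ∧ -9 ≤ n.2 ∧ n.2 < 9)

instance (gameboard : List (List Int)) (nodes_to_remove : List (Int × Int)) : Decidable (Pre_modify_gameboard gameboard nodes_to_remove) := by
  unfold Pre_modify_gameboard; infer_instance

def pvWitness_modify_gameboard : List (List Int) × (List (Int × Int)) :=
  ([[1,2,3,4,5,6,7,8,0],[0,1,0,1,0,1,0,1,0],[2,2,2,2,2,2,2,2,0],
    [3,0,3,0,3,0,3,0,0],[4,4,4,4,4,4,4,4,0],[5,5,5,5,5,5,5,5,0],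
    [6,6,6,6,6,6,6,6,0],[7,7,7,7,7,7,7,7,0],[8,8,8,8,8,8,8,8,0]],
   [(0,0),(1,1),(-1,-2)])

def Spec_modify_gameboard (gameboard : List (List Int)) (nodes_to_remove : List (Int × Int)) (out : List (List Int)) : Prop := out = modify_gameboard_alt gameboard nodes_to_remove
instance (gameboard : List (List Int)) (nodes_to_remove : List (Int × Int)) (out : List (List Int)) : Decidable (Spec_modify_gameboard gameboard nodes_to_remove out) := by unfold Spec_modify_gameboard; infer_instance

-- ===== CLAIM (what is proved, stated in full; the proofs are below) =====
def Claim_equal_modify_gameboard : Prop := ∀ (gameboard : List (List Int)) (nodes_to_remove : List (Int × Int)), Dom_modify_gameboard gameboard nodes_to_remove → Pre_modify_gameboard gameboard nodes_to_remove → Spec_modify_gameboard gameboard nodes_to_remove (modify_gameboard gameboard nodes_to_remove)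

-- ===== LEMMAS AND PROOFS =====

def Shape9 (g : List (List Int)) : Prop := g.length = 9 ∧ ∀ row ∈ g, row.length = 9

theorem shape_setC {g : List (List Int)} (h : Shape9 g) (r c : Nat) (v : Int) :
    Shape9 (setC g r c v) := by
  obtain ⟨hl, hrow⟩ := h
  refine ⟨by simp [setC, hl], ?_⟩
  intro row hm
  rw [List.mem_iff_getElem] at hm
  obtain ⟨i, hi, rfl⟩ := hm
  simp only [setC]
  rw [List.getElem_modify]
  split
  · simp only [List.length_set]
    exact hrow _ (List.getElem_mem _)
  · exact hrow _ (List.getElem_mem _)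

theorem getC_setC_self {g : List (List Int)} (h : Shape9 g) {r c : Nat}
    (hr : r < 9) (hc : c < 9) (v : Int) : getC (setC g r c v) r c = v := by
  obtain ⟨hl, hrow⟩ := h
  have hr' : r < g.length := by omega
  have hcl : c < (g[r]'hr').length := by rw [hrow _ (List.getElem_mem _)]; exact hc
  simp [setC, getC, List.getD_eq_getElem?_getD,
    List.getElem?_eq_getElem hr', List.getElem?_set_self hcl]

theorem getC_setC_ne {g : List (List Int)} {r c r' c' : Nat}
    (hne : r ≠ r' ∨ c ≠ c') (v : Int) : getC (setC g r c v) r' c' = getC g r' c' := by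
  rcases hne with hne | hne
  · simp [setC, getC, List.getD_eq_getElem?_getD, hne]
  · by_cases hrr : r = r'
    · subst hrr
      simp [setC, getC, List.getD_eq_getElem?_getD]
      cases h : g[r]? with
      | none => rfl
      | some row => simp [List.getElem?_set_ne hne]
    · simp [setC, getC, List.getD_eq_getElem?_getD, hrr]

theorem board_ext {g₁ g₂ : List (List Int)} (h₁ : Shape9 g₁) (h₂ : Shape9 g₂)
    (h : ∀ r < 9, ∀ c < 9, getC g₁ r c = getC g₂ r c) : g₁ = g₂ := by
  obtain ⟨hl₁, hrow₁⟩ := h₁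
  obtain ⟨hl₂, hrow₂⟩ := h₂
  apply List.ext_getElem (by omega)
  intro r hr hr'
  apply List.ext_getElem
  · rw [hrow₁ _ (List.getElem_mem _), hrow₂ _ (List.getElem_mem _)]
  intro c hc hc'
  have hcr : c < 9 := by rw [hrow₁ _ (List.getElem_mem _)] at hc; exact hc
  have := h r (by omega) c hcr
  simpa [getC, List.getD_eq_getElem?_getD, List.getElem?_eq_getElem hr,
    List.getElem?_eq_getElem hr',
    List.getElem?_eq_getElem (hc), List.getElem?_eq_getElem (hc')] using this

def pureGrav (rows : List Nat) (st : List Int × Nat) : List Int × Nat :=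
  rows.foldl (fun st r =>
    if st.1.getD r 0 = 0 then st
    else ((st.1.set r 0).set st.2 (st.1.getD r 0), st.2 - 1)) st

theorem pureGrav_spec (a : List Int) : ∀ (nz : List Int), (∀ v ∈ nz, v ≠ 0) →
    a.length + nz.length ≤ 9 →
    pureGrav ((List.range a.length).reverse)
      (a ++ (List.replicate (9 - (a.length + nz.length)) 0 ++ nz), 8 - nz.length)
    = (List.replicate (9 - ((a.filter (· ≠ 0)).length + nz.length)) 0 ++ ((a.filter (· ≠ 0)) ++ nz),
       8 - ((a.filter (· ≠ 0)).length + nz.length)) := by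
  induction a using List.reverseRecOn with
  | nil => intro nz h1 h2; simp [pureGrav]
  | append_singleton b v ih =>
    intro nz h1 h2
    simp only [List.length_append, List.length_singleton] at h2 ⊢
    rw [List.range_succ, List.reverse_append]
    simp only [List.reverse_singleton, List.singleton_append, pureGrav, List.foldl_cons]
    have hread : ((b ++ [v] ++ (List.replicate (9 - (b.length + 1 + nz.length)) 0 ++ nz)).getD b.length 0) = v := by
      rw [List.append_assoc b [v], List.getD_append_right _ _ _ _ (le_refl _)]
      simp
    rw [hread]
    by_cases hv : v = 0
    · subst hv
      rw [if_pos rfl]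
      have hcol : b ++ [(0:Int)] ++ (List.replicate (9 - (b.length + 1 + nz.length)) 0 ++ nz)
          = b ++ (List.replicate (9 - (b.length + nz.length)) 0 ++ nz) := by
        have h9 : 9 - (b.length + nz.length) = (9 - (b.length + 1 + nz.length)) + 1 := by omega
        rw [h9, List.append_assoc]
        simp [List.replicate_succ]
      rw [hcol]
      have hih := ih nz h1 (by omega)
      simp only [pureGrav] at hih
      rw [hih]
      simp [List.filter_append]
    · rw [if_neg hv]
      have hz9 : b.length + 1 + nz.length ≤ 9 := h2
      have hset1 : ((b ++ [v]) ++ (List.replicate (9 - (b.length + 1 + nz.length)) 0 ++ nz)).set b.length 0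
          = (b ++ List.replicate (9 - (b.length + 1 + nz.length) + 1) 0) ++ nz := by
        rw [List.set_append, if_pos (by simp)]
        rw [List.set_append, if_neg (by omega)]
        simp [List.replicate_succ, List.append_assoc]
      have hset2 : (((b ++ List.replicate (9 - (b.length + 1 + nz.length) + 1) 0) ++ nz)).set (8 - nz.length) v
          = b ++ (List.replicate (9 - (b.length + 1 + nz.length)) 0 ++ (v :: nz)) := by
        have hidx : 8 - nz.length = b.length + (9 - (b.length + 1 + nz.length)) := by omega
        rw [hidx, List.set_append, if_pos (by simp)]
        rw [List.set_append, if_neg (by omega)]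
        have : b.length + (9 - (b.length + 1 + nz.length)) - b.length = 9 - (b.length + 1 + nz.length) := by omega
        rw [this, List.replicate_succ' (n := 9 - (b.length + 1 + nz.length))]
        rw [List.set_append, if_neg (by simp)]
        simp [List.append_assoc]
      rw [hset1, hset2]
      have hmem : ∀ w ∈ v :: nz, w ≠ 0 := by
        intro w hw
        rcases List.mem_cons.mp hw with h | h
        · exact h ▸ hv
        · exact h1 _ h
      have hih := ih (v :: nz) hmem (by simp; omega)
      simp only [List.length_cons] at hih
      have harith : 9 - (b.length + (nz.length + 1)) = 9 - (b.length + 1 + nz.length) := by omega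
      have harith2 : 8 - (nz.length + 1) = 8 - nz.length - 1 := by omega
      rw [harith, harith2] at hih
      simp only [pureGrav] at hih
      rw [hih]
      have hfil : List.filter (fun x => decide (x ≠ 0)) (b ++ [v]) = List.filter (fun x => decide (x ≠ 0)) b ++ [v] := by
        simp [List.filter_append, hv]
      rw [hfil]
      simp only [List.length_append, List.length_singleton]
      have e1 : (List.filter (fun x => decide (x ≠ 0)) b).length + 1 + nz.length
          = (List.filter (fun x => decide (x ≠ 0)) b).length + (nz.length + 1) := by omega
      rw [e1]
      simp [List.append_assoc]

-- collapse of one column: zeros on top of the nonzero entries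
def collapse (w : List Int) : List Int :=
  List.replicate (9 - (w.filter (· ≠ 0)).length) 0 ++ w.filter (· ≠ 0)

def writeCol (g : List (List Int)) (c : Nat) (w : List Int) : List (List Int) :=
  (List.range 9).foldl (fun g r => setC g r c (w.getD r 0)) g

theorem getD_set (w : List Int) (i j : Nat) (v : Int) :
    (w.set i v).getD j 0 = if i = j ∧ i < w.length then v else w.getD j 0 := by
  simp only [List.getD_eq_getElem?_getD, List.getElem?_set]
  split_ifs with h1 h2 h3 <;> simp_all <;> omega

theorem shape_foldl {α : Type} {f : List (List Int) → α → List (List Int)} :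
    ∀ (l : List α) (g : List (List Int)), Shape9 g →
    (∀ g x, Shape9 g → Shape9 (f g x)) → Shape9 (l.foldl f g) := by
  intro l
  induction l with
  | nil => intro g hg _; exact hg
  | cons x t ih => intro g hg hf; exact ih _ (hf g x hg) hf

theorem length_colOf (g : List (List Int)) (c : Nat) : (colOf g c).length = 9 := by
  simp [colOf]

theorem colOf_getD {g : List (List Int)} {r : Nat} (hr : r < 9) (c : Nat) :
    (colOf g c).getD r 0 = getC g r c := by
  simp [colOf, List.getD_eq_getElem?_getD, List.getElem?_map, List.getElem?_range, hr]

theorem colOf_ext {g g' : List (List Int)} {c c' : Nat}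
    (h : ∀ r < 9, getC g r c = getC g' r c') : colOf g c = colOf g' c' := by
  apply List.ext_getElem (by simp [length_colOf])
  intro i h1 h2
  simp only [colOf, List.getElem_map, List.getElem_range]
  exact h i (by simpa [length_colOf] using h1)

theorem getC_writeAux {c : Nat} {w : List Int} :
    ∀ (rows : List Nat), (∀ r ∈ rows, r < 9) → ∀ (g : List (List Int)), Shape9 g →
    ∀ r' < 9, ∀ c' < 9,
    getC (rows.foldl (fun g r => setC g r c (w.getD r 0)) g) r' c' =
      if r' ∈ rows ∧ c' = c then w.getD r' 0 else getC g r' c' := by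
  intro rows
  induction rows with
  | nil => intro _ g hg r' hr' c' hc'; simp
  | cons r t ih =>
    intro hlt g hg r' hr' c' hc'
    simp only [List.foldl_cons]
    rw [ih (fun x hx => hlt x (by simp [hx])) _ (shape_setC hg _ _ _) r' hr' c' hc']
    by_cases hm : r' ∈ t ∧ c' = c
    · rw [if_pos hm, if_pos ⟨by simp [hm.1], hm.2⟩]
    · rw [if_neg hm]
      by_cases hh : r' = r ∧ c' = c
      · obtain ⟨rfl, rfl⟩ := hh
        rw [if_pos ⟨by simp, rfl⟩]
        exact getC_setC_self hg (hlt r' (by simp)) hc' _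
      · have hnot : ¬ (r' ∈ r :: t ∧ c' = c) := by
          intro hco
          rcases List.mem_cons.mp hco.1 with h | h
          · exact hh ⟨h, hco.2⟩
          · exact hm ⟨h, hco.2⟩
        rw [if_neg hnot]
        by_cases hcc : c' = c
        · exact getC_setC_ne (Or.inl (fun he => hh ⟨he.symm, hcc⟩)) _
        · exact getC_setC_ne (Or.inr (fun he => hcc he.symm)) _

theorem shape_writeCol {g : List (List Int)} (h : Shape9 g) (c : Nat) (w : List Int) :
    Shape9 (writeCol g c w) :=
  shape_foldl _ _ h (fun g r hg => shape_setC hg _ _ _)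

theorem getC_writeCol {g : List (List Int)} (h : Shape9 g) {c : Nat} (hc : c < 9)
    {w : List Int} {r' c' : Nat} (hr' : r' < 9) (hc' : c' < 9) :
    getC (writeCol g c w) r' c' = if c' = c then w.getD r' 0 else getC g r' c' := by
  rw [writeCol, getC_writeAux (List.range 9) (by simp) g h r' hr' c' hc']
  simp [List.mem_range, hr']

theorem writeCol_colOf_self {g : List (List Int)} (h : Shape9 g) {c : Nat} (hc : c < 9) :
    writeCol g c (colOf g c) = g := by
  apply board_ext (shape_writeCol h c _) h
  intro r hr c' hc'
  rw [getC_writeCol h hc hr hc']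
  split_ifs with he
  · subst he; exact colOf_getD hr _
  · rfl



theorem pureGrav_cons (r : Nat) (t : List Nat) (st : List Int × Nat) :
    pureGrav (r :: t) st = pureGrav t
      (if st.1.getD r 0 = 0 then st else ((st.1.set r 0).set st.2 (st.1.getD r 0), st.2 - 1)) := rfl

theorem getD_replicate_append (m : Nat) (p : List Int) (r : Nat) :
    (List.replicate m 0 ++ p).getD r 0 = if r < m then 0 else p.getD (r - m) 0 := by
  by_cases h : r < m
  · rw [if_pos h, List.getD_append _ _ _ _ (by simpa using h)]
    simp
  · rw [if_neg h, List.getD_append_right _ _ _ _ (by simpa using Nat.le_of_not_lt h)]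
    simp

theorem getC_setC' {g : List (List Int)} (h : Shape9 g) {r c r' c' : Nat}
    (hr' : r' < 9) (hc' : c' < 9) (v : Int) :
    getC (setC g r c v) r' c' = if r = r' ∧ c = c' then v else getC g r' c' := by
  split_ifs with hcond
  · obtain ⟨rfl, rfl⟩ := hcond
    exact getC_setC_self h hr' hc' v
  · rcases Decidable.not_and_iff_not_or_not.mp hcond with h1 | h1
    · exact getC_setC_ne (Or.inl h1) v
    · exact getC_setC_ne (Or.inr h1) v

theorem gravFoldA_eq {c : Nat} (hc : c < 9) :
    ∀ (rows : List Nat), (∀ r ∈ rows, r < 9) →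
    ∀ (g : List (List Int)) (w : List Int) (b : Nat), Shape9 g → w.length = 9 → b < 9 →
    rows.foldl (fun st r =>
      if getC st.1 r c = 0 then st
      else
        let v := getC st.1 r c
        (setC (setC st.1 r c 0) st.2 c v, st.2 - 1)) (writeCol g c w, b)
    = (writeCol g c (pureGrav rows (w, b)).1, (pureGrav rows (w, b)).2) := by
  intro rows
  induction rows with
  | nil => intro _ g w b _ _ _; simp [pureGrav]
  | cons r t ih =>
    intro hlt g w b hg hw hb
    have hr9 : r < 9 := hlt r (by simp)
    have hread : getC (writeCol g c w) r c = w.getD r 0 := by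
      rw [getC_writeCol hg hc hr9 hc]; simp
    rw [List.foldl_cons, pureGrav_cons]
    simp only [hread]
    by_cases h0 : w.getD r 0 = 0
    · rw [if_pos h0, if_pos h0]
      exact ih (fun x hx => hlt x (by simp [hx])) g w b hg hw hb
    · rw [if_neg h0, if_neg h0]
      have hset : setC (setC (writeCol g c w) r c 0) b c (w.getD r 0)
          = writeCol g c ((w.set r 0).set b (w.getD r 0)) := by
        apply board_ext
          (shape_setC (shape_setC (shape_writeCol hg c w) _ _ _) _ _ _)
          (shape_writeCol hg c _)
        intro r' hr' i hi
        rw [getC_setC' (shape_setC (shape_writeCol hg c w) _ _ _) hr' hi,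
          getC_setC' (shape_writeCol hg c w) hr' hi,
          getC_writeCol hg hc hr' hi, getC_writeCol hg hc hr' hi,
          getD_set, getD_set]
        simp only [List.length_set, hw]
        split_ifs <;> first | rfl | omega
      rw [hset]
      exact ih (fun x hx => hlt x (by simp [hx])) g ((w.set r 0).set b (w.getD r 0)) (b - 1)
        hg (by simp [hw]) (by omega)

theorem gravColA_eq {g : List (List Int)} (h : Shape9 g) {c : Nat} (hc : c < 9) :
    gravColA g c = writeCol g c (collapse (colOf g c)) := by
  unfold gravColA
  rw [show ((g, 8) : List (List Int) × Nat) = (writeCol g c (colOf g c), 8) from by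
    rw [writeCol_colOf_self h hc]]
  rw [gravFoldA_eq hc _ (by simp) g (colOf g c) 8 h (length_colOf g c) (by norm_num)]
  have hp := pureGrav_spec (colOf g c) [] (by simp) (by simp [length_colOf])
  simp only [length_colOf, List.length_nil, Nat.add_zero, Nat.sub_self, List.replicate_zero,
    List.append_nil, List.nil_append] at hp
  rw [hp]
  rfl

theorem gravColB_eq (g : List (List Int)) (c : Nat) :
    gravColB g c = writeCol g c (collapse (colOf g c)) := by
  simp only [gravColB, writeCol, collapse]
  congr 1
  funext g' r
  rw [getD_replicate_append]

theorem foldl_congr_inv' {α : Type} {f f' : List (List Int) → α → List (List Int)} :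
    ∀ (l : List α) (g : List (List Int)), Shape9 g →
    (∀ x ∈ l, ∀ g, Shape9 g → f g x = f' g x) →
    (∀ x ∈ l, ∀ g, Shape9 g → Shape9 (f g x)) →
    l.foldl f g = l.foldl f' g := by
  intro l
  induction l with
  | nil => intro g _ _ _; rfl
  | cons x t ih =>
    intro g hg hff hsh
    simp only [List.foldl_cons]
    rw [← hff x (by simp) g hg]
    exact ih _ (hsh x (by simp) g hg) (fun y hy => hff y (by simp [hy]))
      (fun y hy => hsh y (by simp [hy]))

theorem gravA_eq_gravB {g : List (List Int)} (h : Shape9 g) : gravA g = gravB g := by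
  unfold gravA gravB
  apply foldl_congr_inv' _ _ h
  · intro c hcm g' hg'
    rw [gravColA_eq hg' (List.mem_range.mp hcm), gravColB_eq]
  · intro c hcm g' hg'
    rw [gravColA_eq hg' (List.mem_range.mp hcm)]
    exact shape_writeCol hg' _ _

theorem shape_gravB {g : List (List Int)} (h : Shape9 g) : Shape9 (gravB g) := by
  unfold gravB
  apply shape_foldl _ _ h
  intro g' c hg'
  rw [gravColB_eq]
  exact shape_writeCol hg' _ _

theorem getC_gravFold :
    ∀ (cols : List Nat), (∀ x ∈ cols, x < 9) → cols.Nodup →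
    ∀ (g : List (List Int)), Shape9 g → ∀ r < 9, ∀ c < 9,
    getC (cols.foldl gravColB g) r c =
      if c ∈ cols then (collapse (colOf g c)).getD r 0 else getC g r c := by
  intro cols
  induction cols with
  | nil => intro _ _ g hg r hr c hc; simp
  | cons c₀ t ih =>
    intro hlt hnd g hg r hr c hc
    have hc₀ : c₀ < 9 := hlt c₀ (by simp)
    have hg' : Shape9 (gravColB g c₀) := by
      rw [gravColB_eq]; exact shape_writeCol hg _ _
    rw [List.foldl_cons, ih (fun x hx => hlt x (by simp [hx])) hnd.of_cons _ hg' r hr c hc]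
    by_cases hm : c ∈ t
    · rw [if_pos hm, if_pos (by simp [hm])]
      have hne : c ≠ c₀ := fun he => (List.nodup_cons.mp hnd).1 (he ▸ hm)
      have : colOf (gravColB g c₀) c = colOf g c := by
        apply colOf_ext
        intro r' hr'
        rw [gravColB_eq, getC_writeCol hg hc₀ hr' hc, if_neg hne]
      rw [this]
    · rw [if_neg hm]
      by_cases he : c = c₀
      · subst he
        rw [if_pos (by simp), gravColB_eq, getC_writeCol hg hc₀ hr hc, if_pos rfl]
      · rw [if_neg (by simp [he, hm]), gravColB_eq, getC_writeCol hg hc₀ hr hc, if_neg he]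

theorem getC_gravB {g : List (List Int)} (h : Shape9 g) :
    ∀ r < 9, ∀ c < 9, getC (gravB g) r c = (collapse (colOf g c)).getD r 0 := by
  intro r hr c hc
  unfold gravB
  rw [getC_gravFold (List.range 9) (by simp) (List.nodup_range) g h r hr c hc,
    if_pos (List.mem_range.mpr hc)]

theorem collapsed_gravB {g : List (List Int)} (h : Shape9 g) :
    ∀ c < 9, getC (gravB g) 8 c = 0 → ∀ r < 9, getC (gravB g) r c = 0 := by
  intro c hc h0 r hr
  rw [getC_gravB h 8 (by norm_num) c hc] at h0
  rw [getC_gravB h r hr c hc]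
  set f := (colOf g c).filter (· ≠ 0) with hf
  have hk : f.length ≤ 9 := by
    calc f.length ≤ (colOf g c).length := List.length_filter_le _ _
    _ = 9 := length_colOf g c
  by_cases hk0 : f.length = 0
  · rw [collapse, ← hf, hk0, List.length_eq_zero_iff.mp hk0, getD_replicate_append]
    split_ifs <;> simp
  · exfalso
    rw [collapse, ← hf, getD_replicate_append, if_neg (by omega)] at h0
    have h8 : 8 - (9 - f.length) = f.length - 1 := by omega
    rw [h8] at h0
    have hlt : f.length - 1 < f.length := by omega
    have : f.getD (f.length - 1) 0 = f[f.length - 1]'hlt := by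
      rw [List.getD_eq_getElem?_getD, List.getElem?_eq_getElem hlt]; rfl
    rw [this] at h0
    have hmem := List.getElem_mem hlt
    have hall : ∀ x ∈ f, x ≠ 0 := by
      intro x hx
      simp only [hf, List.mem_filter] at hx
      simpa using hx.2
    exact hall _ hmem h0


-- row-write loop characterization (B's inner shift loop)
theorem getC_rowWriteAux {r : Nat} {vals : List Int} :
    ∀ (cols : List Nat), (∀ x ∈ cols, x < 9) → ∀ (g : List (List Int)), Shape9 g →
    ∀ r' < 9, ∀ c' < 9,
    getC (cols.foldl (fun g c => setC g r c (vals.getD c 0)) g) r' c' =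
      if c' ∈ cols ∧ r' = r then vals.getD c' 0 else getC g r' c' := by
  intro cols
  induction cols with
  | nil => intro _ g hg r' hr' c' hc'; simp
  | cons c t ih =>
    intro hlt g hg r' hr' c' hc'
    simp only [List.foldl_cons]
    rw [ih (fun x hx => hlt x (by simp [hx])) _ (shape_setC hg _ _ _) r' hr' c' hc',
      getC_setC' hg hr' hc']
    by_cases hm : c' ∈ t ∧ r' = r
    · rw [if_pos hm, if_pos ⟨by simp [hm.1], hm.2⟩]
    · rw [if_neg hm]
      by_cases hh : c' = c ∧ r' = r
      · rw [if_pos ⟨hh.2.symm, hh.1.symm⟩, if_pos ⟨by simp [hh.1], hh.2⟩, hh.1]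
      · rw [if_neg (fun hx => hh ⟨hx.2.symm, hx.1.symm⟩)]
        rw [if_neg (by
          intro hco
          rcases List.mem_cons.mp hco.1 with h | h
          · exact hh ⟨h, hco.2⟩
          · exact hm ⟨h, hco.2⟩)]

theorem shape_shiftColA {g : List (List Int)} (h : Shape9 g) (l c : Nat) :
    Shape9 (shiftColA g l c) :=
  shape_foldl _ _ h (fun g r hg => shape_setC (shape_setC hg _ _ _) _ _ _)

theorem shiftColAux {l c : Nat} (hl : l < 9) (hc : c < 9) (hlc : l ≠ c) :
    ∀ (rows : List Nat), (∀ x ∈ rows, x < 9) → rows.Nodup →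
    ∀ (g : List (List Int)), Shape9 g → ∀ r' < 9, ∀ i < 9,
    getC (rows.foldl (fun g r => setC (setC g r l (getC g r c)) r c 0) g) r' i =
      if r' ∈ rows then
        (if i = l then getC g r' c else if i = c then 0 else getC g r' i)
      else getC g r' i := by
  intro rows
  induction rows with
  | nil => intro _ _ g hg r' hr' i hi; simp
  | cons r₀ t ih =>
    intro hlt hnd g hg r' hr' i hi
    have hr₀ : r₀ < 9 := hlt r₀ (by simp)
    simp only [List.foldl_cons]
    have hg' : Shape9 (setC (setC g r₀ l (getC g r₀ c)) r₀ c 0) :=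
      shape_setC (shape_setC hg _ _ _) _ _ _
    rw [ih (fun x hx => hlt x (by simp [hx])) hnd.of_cons _ hg' r' hr' i hi]
    by_cases hm : r' ∈ t
    · have hne : r' ≠ r₀ := fun he => (List.nodup_cons.mp hnd).1 (he ▸ hm)
      have e1 : getC (setC (setC g r₀ l (getC g r₀ c)) r₀ c 0) r' c = getC g r' c := by
        rw [getC_setC_ne (Or.inl (fun he => hne he.symm)),
          getC_setC_ne (Or.inl (fun he => hne he.symm))]
      have e2 : getC (setC (setC g r₀ l (getC g r₀ c)) r₀ c 0) r' i = getC g r' i := by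
        rw [getC_setC_ne (Or.inl (fun he => hne he.symm)),
          getC_setC_ne (Or.inl (fun he => hne he.symm))]
      rw [e1, e2, if_pos hm, if_pos (show r' ∈ r₀ :: t by simp [hm])]
    · rw [if_neg hm]
      by_cases hr : r' = r₀
      · subst hr
        rw [if_pos (by simp)]
        rw [getC_setC' (shape_setC hg _ _ _) hr' hi, getC_setC' hg hr' hi]
        by_cases hil : i = l
        · rw [if_neg (by rintro ⟨-, h⟩; exact hlc (hil ▸ h.symm)), if_pos ⟨rfl, hil.symm⟩,
            if_pos hil]
        · by_cases hic : i = c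
          · rw [if_pos ⟨rfl, hic.symm⟩, if_neg hil, if_pos hic]
          · rw [if_neg (fun hx => hic hx.2.symm), if_neg (fun hx => hil hx.2.symm),
              if_neg hil, if_neg hic]
      · rw [if_neg (by simp [hr, hm]),
          getC_setC_ne (Or.inl (fun he => hr he.symm)),
          getC_setC_ne (Or.inl (fun he => hr he.symm))]

theorem getC_shiftColA {g : List (List Int)} (h : Shape9 g) {l c : Nat}
    (hl : l < 9) (hc : c < 9) (hlc : l ≠ c) :
    ∀ r' < 9, ∀ i < 9, getC (shiftColA g l c) r' i =
      if i = l then getC g r' c else if i = c then 0 else getC g r' i := by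
  intro r' hr' i hi
  rw [shiftColA, shiftColAux hl hc hlc (List.range 9) (by simp) List.nodup_range g h r' hr' i hi,
    if_pos (List.mem_range.mpr hr')]

def keptBelow (h : List (List Int)) (n : Nat) : List Nat :=
  (List.range n).filter (fun c => getC h 8 c ≠ 0)

theorem keptBelow_le (h : List (List Int)) (n : Nat) : (keptBelow h n).length ≤ n := by
  calc (keptBelow h n).length ≤ (List.range n).length := List.length_filter_le _ _
  _ = n := List.length_range

theorem keptBelow_succ (h : List (List Int)) (n : Nat) :
    keptBelow h (n + 1) = keptBelow h n ++ if getC h 8 n ≠ 0 then [n] else [] := by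
  simp only [keptBelow, List.range_succ, List.filter_append, List.filter_singleton]
  split_ifs with h1 h2 h3 <;> simp_all

theorem shiftAAux {H : List (List Int)} (hs : Shape9 H)
    (hcol : ∀ c < 9, getC H 8 c = 0 → ∀ r < 9, getC H r c = 0) :
    ∀ (k n : Nat), n + k = 9 → ∀ (g : List (List Int)) (l : Nat),
    l = (keptBelow H n).length → Shape9 g →
    (∀ r < 9, ∀ i < 9, getC g r i =
      if i < (keptBelow H n).length then getC H r ((keptBelow H n).getD i 0)
      else if i < n then 0 else getC H r i) →
    Shape9 ((List.range' n k).foldl (fun st c =>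
        if getC st.1 8 c = 0 then st
        else if c ≠ st.2 then (shiftColA st.1 st.2 c, st.2 + 1)
        else (st.1, st.2 + 1)) (g, l)).1 ∧
    ∀ r < 9, ∀ i < 9, getC ((List.range' n k).foldl (fun st c =>
        if getC st.1 8 c = 0 then st
        else if c ≠ st.2 then (shiftColA st.1 st.2 c, st.2 + 1)
        else (st.1, st.2 + 1)) (g, l)).1 r i =
      if i < (keptBelow H 9).length then getC H r ((keptBelow H 9).getD i 0) else 0 := by
  intro k
  induction k with
  | zero =>
    intro n hn g l hl hsh hE
    have h9 : n = 9 := by omega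
    subst h9
    simp only [List.range'_zero, List.foldl_nil]
    refine ⟨hsh, ?_⟩
    intro r hr i hi
    rw [hE r hr i hi]
    by_cases ha : i < (keptBelow H 9).length
    · rw [if_pos ha, if_pos ha]
    · rw [if_neg ha, if_neg ha, if_pos hi]
  | succ k ih =>
    intro n hn g l hl hsh hE
    have hn9 : n < 9 := by omega
    have hl_le : (keptBelow H n).length ≤ n := keptBelow_le H n
    rw [List.range'_succ, List.foldl_cons]
    have hread : getC g 8 n = getC H 8 n := by
      rw [hE 8 (by norm_num) n hn9, if_neg (by omega), if_neg (by omega)]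
    by_cases h8 : getC H 8 n = 0
    · rw [if_pos (by rw [hread]; exact h8)]
      have hkb : keptBelow H (n + 1) = keptBelow H n := by
        rw [keptBelow_succ, if_neg (by simpa using h8), List.append_nil]
      apply ih (n + 1) (by omega) g l (by rw [hkb, hl]) hsh
      intro r hr i hi
      rw [hE r hr i hi, hkb]
      by_cases ha : i < (keptBelow H n).length
      · rw [if_pos ha, if_pos ha]
      · rw [if_neg ha, if_neg ha]
        by_cases hb : i < n
        · rw [if_pos hb, if_pos (show i < n + 1 by omega)]
        · rw [if_neg hb]
          by_cases hc2 : i < n + 1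
          · rw [if_pos hc2, show i = n from by omega]
            exact hcol n hn9 h8 r hr
          · rw [if_neg hc2]
    · rw [if_neg (by rw [hread]; exact h8)]
      have hkb : keptBelow H (n + 1) = keptBelow H n ++ [n] := by
        rw [keptBelow_succ, if_pos h8]
      have hkb1 : (keptBelow H (n + 1)).length = (keptBelow H n).length + 1 := by
        rw [hkb, List.length_append, List.length_singleton]
      by_cases hcl : n = l
      · rw [if_neg (by omega)]
        apply ih (n + 1) (by omega) g (l + 1) (by rw [hkb1, hl]) hsh
        intro r hr i hi
        rw [hE r hr i hi, hkb]
        by_cases hil : i < (keptBelow H n).length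
        · rw [if_pos hil, if_pos (show i < (keptBelow H n ++ [n]).length by simp; omega),
            List.getD_append _ _ _ _ (by omega)]
        · by_cases hieq : i = (keptBelow H n).length
          · rw [if_neg hil, if_neg (show ¬ i < n by omega),
              if_pos (show i < (keptBelow H n ++ [n]).length by simp; omega),
              List.getD_append_right _ _ _ _ (by omega),
              show i - (keptBelow H n).length = 0 from by omega,
              show i = n from by omega]
            simp
          · rw [if_neg hil, if_neg (show ¬ i < n by omega),
              if_neg (show ¬ i < (keptBelow H n ++ [n]).length by simp; omega),
              if_neg (show ¬ i < n + 1 by omega)]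
      · rw [if_pos (by omega)]
        have hlen9 : l < 9 := by omega
        have hlc : l ≠ n := fun he => hcl he.symm
        apply ih (n + 1) (by omega) (shiftColA g l n) (l + 1) (by rw [hkb1, hl])
          (shape_shiftColA hsh _ _)
        intro r hr i hi
        rw [getC_shiftColA hsh hlen9 hn9 hlc r hr i hi, hkb]
        by_cases hil : i = l
        · rw [if_pos hil, hE r hr n hn9,
            if_neg (show ¬ n < (keptBelow H n).length by omega),
            if_neg (show ¬ n < n by omega),
            if_pos (show i < (keptBelow H n ++ [n]).length by simp; omega),
            List.getD_append_right _ _ _ _ (by omega),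
            show i - (keptBelow H n).length = 0 from by omega]
          simp
        · by_cases hin : i = n
          · rw [if_neg hil, if_pos hin,
              if_neg (show ¬ i < (keptBelow H n ++ [n]).length by simp; omega),
              if_pos (show i < n + 1 by omega)]
          · rw [if_neg hil, if_neg hin, hE r hr i hi]
            by_cases hlt : i < (keptBelow H n).length
            · rw [if_pos hlt, if_pos (show i < (keptBelow H n ++ [n]).length by simp; omega),
                List.getD_append _ _ _ _ (by omega)]
            · by_cases hn' : i < n
              · rw [if_neg hlt, if_pos hn',
                  if_neg (show ¬ i < (keptBelow H n ++ [n]).length by simp; omega),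
                  if_pos (show i < n + 1 by omega)]
              · rw [if_neg hlt, if_neg hn',
                  if_neg (show ¬ i < (keptBelow H n ++ [n]).length by simp; omega),
                  if_neg (show ¬ i < n + 1 by omega)]

theorem shiftBAux {H : List (List Int)} {kept : List Nat} (hk9 : ∀ x ∈ kept, x < 9) :
    ∀ (rowsL : List Nat), (∀ x ∈ rowsL, x < 9) → rowsL.Nodup →
    ∀ (g : List (List Int)), Shape9 g →
    (∀ r ∈ rowsL, ∀ c < 9, getC g r c = getC H r c) →
    ∀ r' < 9, ∀ c' < 9,
    getC (rowsL.foldl (fun g r =>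
        let vals := kept.map (fun c => getC g r c) ++ List.replicate (9 - kept.length) 0
        (List.range 9).foldl (fun g c => setC g r c (vals.getD c 0)) g) g) r' c' =
      if r' ∈ rowsL then
        (kept.map (fun c => getC H r' c) ++ List.replicate (9 - kept.length) 0).getD c' 0
      else getC g r' c' := by
  intro rowsL
  induction rowsL with
  | nil => intro _ _ g hg _ r' hr' c' hc'; simp
  | cons r₀ t ih =>
    intro hlt hnd g hg hagree r' hr' c' hc'
    have hr₀ : r₀ < 9 := hlt r₀ (by simp)
    rw [List.foldl_cons]
    have hvals : (kept.map (fun c => getC g r₀ c) ++ List.replicate (9 - kept.length) 0)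
        = kept.map (fun c => getC H r₀ c) ++ List.replicate (9 - kept.length) 0 := by
      congr 1
      apply List.map_congr_left
      intro c hcm
      exact hagree r₀ (by simp) c (hk9 c hcm)
    have happ : (let vals := kept.map (fun c => getC g r₀ c) ++ List.replicate (9 - kept.length) 0
          (List.range 9).foldl (fun g c => setC g r₀ c (vals.getD c 0)) g)
        = (List.range 9).foldl (fun h c => setC h r₀ c
            ((kept.map (fun c => getC H r₀ c) ++ List.replicate (9 - kept.length) 0).getD c 0)) g := by
      show (List.range 9).foldl (fun h c => setC h r₀ c
            ((kept.map (fun c => getC g r₀ c) ++ List.replicate (9 - kept.length) 0).getD c 0)) g = _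
      rw [hvals]
    rw [happ]
    have hg' : Shape9 ((List.range 9).foldl (fun h c => setC h r₀ c
        ((kept.map (fun c => getC H r₀ c) ++ List.replicate (9 - kept.length) 0).getD c 0)) g) :=
      shape_foldl _ _ hg (fun g' c hg' => shape_setC hg' _ _ _)
    have hagree' : ∀ r ∈ t, ∀ c < 9, getC ((List.range 9).foldl (fun h c => setC h r₀ c
        ((kept.map (fun c => getC H r₀ c) ++ List.replicate (9 - kept.length) 0).getD c 0)) g) r c
        = getC H r c := by
      intro r hrm c hc
      have hrne : r ≠ r₀ := fun he => (List.nodup_cons.mp hnd).1 (he ▸ hrm)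
      rw [getC_rowWriteAux (List.range 9) (by simp) g hg r (hlt r (by simp [hrm])) c hc,
        if_neg (fun hx => hrne hx.2)]
      exact hagree r (by simp [hrm]) c hc
    rw [ih (fun x hx => hlt x (by simp [hx])) hnd.of_cons _ hg' hagree' r' hr' c' hc']
    by_cases hm : r' ∈ t
    · rw [if_pos hm, if_pos (by simp [hm])]
    · rw [if_neg hm,
        getC_rowWriteAux (List.range 9) (by simp) g hg r' hr' c' hc']
      by_cases hr0 : r' = r₀
      · rw [if_pos ⟨List.mem_range.mpr hc', hr0⟩, if_pos (by simp [hr0]), hr0]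
      · rw [if_neg (fun hx => hr0 hx.2), if_neg (by simp [hr0, hm])]

theorem vals_getD (H : List (List Int)) (r : Nat) (kept : List Nat) {c : Nat} (hc : c < 9) :
    (kept.map (fun cc => getC H r cc) ++ List.replicate (9 - kept.length) 0).getD c 0
      = if c < kept.length then getC H r (kept.getD c 0) else 0 := by
  by_cases h : c < kept.length
  · rw [if_pos h, List.getD_append _ _ _ _ (by simpa using h)]
    rw [List.getD_eq_getElem?_getD, List.getElem?_map, List.getElem?_eq_getElem h,
      List.getD_eq_getElem?_getD, List.getElem?_eq_getElem h]
    rfl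
  · rw [if_neg h, List.getD_append_right _ _ _ _ (by simpa using Nat.le_of_not_lt h)]
    rw [List.getD_eq_getElem?_getD, List.getElem?_replicate]
    split_ifs <;> rfl

theorem shape_shiftB {H : List (List Int)} (hs : Shape9 H) : Shape9 (shiftB H) := by
  unfold shiftB
  apply shape_foldl _ _ hs
  intro g r hg
  exact shape_foldl _ _ hg (fun g' c hg' => shape_setC hg' _ _ _)

theorem getC_shiftB {H : List (List Int)} (hs : Shape9 H) :
    ∀ r < 9, ∀ c < 9, getC (shiftB H) r c =
      if c < (keptBelow H 9).length then getC H r ((keptBelow H 9).getD c 0) else 0 := by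
  intro r hr c hc
  have hk9 : ∀ x ∈ keptBelow H 9, x < 9 := fun x hx =>
    List.mem_range.mp (List.mem_filter.mp hx).1
  have hB := shiftBAux (H := H) (kept := keptBelow H 9) hk9 (List.range 9) (by simp)
    List.nodup_range H hs (fun _ _ _ _ => rfl) r hr c hc
  rw [if_pos (List.mem_range.mpr hr)] at hB
  rw [show shiftB H = ((List.range 9).foldl (fun g r =>
      let vals := (keptBelow H 9).map (fun c => getC g r c) ++
        List.replicate (9 - (keptBelow H 9).length) 0
      (List.range 9).foldl (fun g c => setC g r c (vals.getD c 0)) g) H) from rfl]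
  rw [hB, vals_getD H r (keptBelow H 9) hc]

theorem shiftA_eq_shiftB {h : List (List Int)} (hs : Shape9 h)
    (hcol : ∀ c < 9, getC h 8 c = 0 → ∀ r < 9, getC h r c = 0) :
    shiftA h = shiftB h := by
  have hA := shiftAAux hs hcol 9 0 (by norm_num) h 0 (by rfl) hs
    (by intro r hr i hi; simp [keptBelow])
  obtain ⟨hshA, hentA⟩ := hA
  have hA1 : shiftA h = ((List.range' 0 9).foldl (fun st c =>
      if getC st.1 8 c = 0 then st
      else if c ≠ st.2 then (shiftColA st.1 st.2 c, st.2 + 1)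
      else (st.1, st.2 + 1)) (h, 0)).1 := by
    rw [shiftA, List.range_eq_range']
  rw [hA1]
  apply board_ext hshA (shape_shiftB hs)
  intro r hr i hi
  rw [hentA r hr i hi, getC_shiftB hs r hr i hi]

theorem shape_removeNodes {g : List (List Int)} (h : Shape9 g) (nodes : List (Int × Int)) :
    Shape9 (removeNodes g nodes) :=
  shape_foldl _ _ h (fun g n hg => shape_setC hg _ _ _)

-- ===== VERDICT (by name: the statement is the Claim_ definition above) =====
theorem modify_gameboard_spec : Claim_equal_modify_gameboard := by
  intro gb nodes _ hpre
  unfold Spec_modify_gameboard modify_gameboard modify_gameboard_alt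
  by_cases hn : nodes.length < 2
  · rw [if_pos hn, if_pos hn]
  · rw [if_neg hn, if_neg hn]
    rcases hpre with h | ⟨h1, h2, _⟩
    · exact absurd h hn
    have hg : Shape9 (removeNodes gb nodes) := shape_removeNodes ⟨h1, h2⟩ nodes
    rw [gravA_eq_gravB hg]
    exact shiftA_eq_shiftB (shape_gravB hg) (collapsed_gravB hg)
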